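-- pv_equiv track=rewrite | github.com/Spookiel/CompetitiveProgramming | NWERC/2018/Equality Control/Equality Control.py | eat_list
-- ===== SOURCE A (Python) =====
-- def eat_list(string, start):
--     nums = []
--     cint = ""
--     for ind in range(start, len(string)):
--         if string[ind].isdigit():
--             cint += string[ind]
--         elif string[ind] == "]":
--             if cint:
--                 nums.append(int(cint))
--             return nums, ind
--         else:
--             if cint:
--                 nums.append(int(cint))
--             cint = ""
--     if cint:
--         nums.append(int(cint))
--     return nums, len(string)
-- ===== SOURCE B (Python) =====
-- def eat_list(string, start):
--     end = string.find(']', start)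
--     if end == -1:
--         end = len(string)
--     segment = string[start:end]
--     cleaned = ''.join(c if c.isdigit() else ' ' for c in segment)
--     return [int(tok) for tok in cleaned.split()], end
-- ===== Notes on version B (the rewrite author's own statement) =====
-- stated objective: idiomatic
-- what changed: B replaces A's single character-by-character state machine (accumulator string, append-on-delimiter, early return) by locating the closing ']' with str.find first, slicing the segment, blanking non-digit characters and splitting on whitespace.
-- outside the precondition, e.g. on eat_list('1]', -2): A returns ([1], -1), B returns ([1], 1)
import Mathlib
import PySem

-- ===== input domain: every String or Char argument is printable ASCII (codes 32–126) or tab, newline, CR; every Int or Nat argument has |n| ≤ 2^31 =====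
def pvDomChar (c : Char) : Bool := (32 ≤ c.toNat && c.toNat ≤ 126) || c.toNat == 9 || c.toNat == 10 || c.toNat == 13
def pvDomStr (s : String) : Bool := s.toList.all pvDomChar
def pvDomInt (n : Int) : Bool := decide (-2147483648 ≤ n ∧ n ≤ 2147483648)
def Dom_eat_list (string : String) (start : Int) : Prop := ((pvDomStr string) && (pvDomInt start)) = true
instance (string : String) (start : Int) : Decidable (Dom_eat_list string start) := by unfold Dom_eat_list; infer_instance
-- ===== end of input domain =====

-- B replaces A's single character-by-character state machine by: find the closing ']' (or end of
-- string) first, slice the segment, blank out the non-digit characters and split on whitespace —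
-- a different decomposition (objective: idiomatic), same return value for every start ≥ 0.

-- ===== PORT A =====
-- int(cint) where cint is a nonempty run of '0'-'9': PySem.Int.ofChars? is exact there (never none,
-- so .getD 0 is never consulted); string[ind].isdigit() on one char is PySem.Chars.isdigit (exact on ASCII).
def eat_list_go (s : List Char) (stop : Int) (nums : List Int) (cint : List Char) (ind : Int) :
    List Int × Int :=
  if _h : ind < stop then
    match PySem.List.pyGet? s ind with
    | none => (nums, ind)  -- IndexError (start < -len): outside Pre_eat_list
    | some c =>
      if PySem.Chars.isdigit c then
        eat_list_go s stop nums (cint ++ [c]) (ind + 1)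
      else if c = ']' then
        ((if cint ≠ [] then nums ++ [(PySem.Int.ofChars? cint).getD 0] else nums), ind)
      else
        eat_list_go s stop (if cint ≠ [] then nums ++ [(PySem.Int.ofChars? cint).getD 0] else nums)
          [] (ind + 1)
  else
    ((if cint ≠ [] then nums ++ [(PySem.Int.ofChars? cint).getD 0] else nums), stop)
  termination_by (stop - ind).toNat
  decreasing_by all_goals omega

def eat_list (string : String) (start : Int) : List Int × Int :=
  eat_list_go string.toList (string.toList.length : Int) [] [] start

-- ===== PORT B =====
def eat_list_alt (string : String) (start : Int) : List Int × Int :=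
  let end0 : Int := PySem.Str.findFrom string "]" start
  let endI : Int := if end0 = -1 then (string.toList.length : Int) else end0
  let segment : List Char := PySem.List.slice string.toList (some start) (some endI)
  let cleaned : List Char := segment.map (fun c => if PySem.Chars.isdigit c then c else ' ')
  ((PySem.Chars.split₀ cleaned).map (fun tok => (PySem.Int.ofChars? tok).getD 0), endI)

-- ===== PRECONDITION & SPEC =====
-- Pre_ restricts to the parser's natural domain start ≥ 0: for start < -len(string) A raises
-- IndexError, and for -len(string) ≤ start < 0 A's negative-index wraparound re-reads the tail of
-- the string before the whole string (and can return a negative index) — an accident of Python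
-- indexing, not part of the task.
def Pre_eat_list (string : String) (start : Int) : Prop := 0 ≤ start
instance (string : String) (start : Int) : Decidable (Pre_eat_list string start) := by
  unfold Pre_eat_list; infer_instance

def pvWitness_eat_list : String × Int := ("12 34,x7]9", 0)

def Spec_eat_list (string : String) (start : Int) (out : List Int × Int) : Prop :=
  out = eat_list_alt string start
instance (string : String) (start : Int) (out : List Int × Int) :
    Decidable (Spec_eat_list string start out) := by unfold Spec_eat_list; infer_instance

-- ===== CLAIM (what is proved, stated in full; the proofs are below) =====
def Claim_equal_eat_list : Prop := ∀ (string : String) (start : Int),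
  Dom_eat_list string start → Pre_eat_list string start →
  Spec_eat_list string start (eat_list string start)

-- ===== LEMMAS AND PROOFS =====

theorem pv_not_space_of_digit (c : Char) (h : PySem.Chars.isdigit c = true) :
    PySem.Chars.isspace c = false := by
  simp only [PySem.Chars.isdigit, Bool.and_eq_true, decide_eq_true_eq, Char.le_def] at h
  simp only [PySem.Chars.isspace, Char.toNat]
  have h1 : 48 ≤ c.val.toNat := h.1
  have h2 : c.val.toNat ≤ 57 := h.2
  simp only [Bool.or_eq_false_iff, Bool.and_eq_false_iff, decide_eq_false_iff_not]
  omega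

-- the maximal digit runs of cs, with carry cint, as integer values (common reference form)
def pvRuns (cs : List Char) (cint : List Char) : List Int :=
  match cs with
  | [] => if cint ≠ [] then [(PySem.Int.ofChars? cint).getD 0] else []
  | c :: rest =>
    if PySem.Chars.isdigit c then pvRuns rest (cint ++ [c])
    else (if cint ≠ [] then [(PySem.Int.ofChars? cint).getD 0] else []) ++ pvRuns rest []

theorem pvRuns_go (cs : List Char) :
    ∀ (k : Nat) (ind : Int) (nums : List Int) (cint : List Char),
    0 ≤ ind → ind ≤ (cs.length : Int) → ((cs.length : Int) - ind).toNat = k →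
    eat_list_go cs (cs.length : Int) nums cint ind =
      (nums ++ pvRuns ((cs.drop ind.toNat).takeWhile (· ≠ ']')) cint,
       ind + (((cs.drop ind.toNat).takeWhile (· ≠ ']')).length : Int)) := by
  intro k
  induction k with
  | zero =>
    intro ind nums cint h0 hle hk
    have hind : ind = (cs.length : Int) := by omega
    subst hind
    rw [eat_list_go]
    simp [pvRuns]
    split_ifs <;> simp
  | succ k ih =>
    intro ind nums cint h0 hle hk
    have hlt : ind < (cs.length : Int) := by omega
    have hn : ind.toNat < cs.length := by omega
    rw [eat_list_go, dif_pos hlt,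
      PySem.List.pyGet?_eq_some_getElem (xs := cs) (i := ind) h0 (by exact_mod_cast hlt)]
    dsimp only
    have hdrop : cs.drop ind.toNat = cs[ind.toNat] :: cs.drop (ind.toNat + 1) :=
      List.drop_eq_getElem_cons hn
    have htn : (ind + 1).toNat = ind.toNat + 1 := by omega
    by_cases hd : PySem.Chars.isdigit cs[ind.toNat] = true
    · have hne : cs[ind.toNat] ≠ ']' := by
        intro h; rw [h] at hd; exact absurd hd (by decide)
      rw [if_pos hd, ih (ind + 1) nums (cint ++ [cs[ind.toNat]]) (by omega) (by omega) (by omega)]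
      rw [hdrop, List.takeWhile_cons_of_pos (by simpa using hne), htn]
      simp [pvRuns, hd]
      omega
    · rw [if_neg hd]
      by_cases hb : cs[ind.toNat] = ']'
      · rw [if_pos hb, hdrop, List.takeWhile_cons_of_neg (by simpa using hb)]
        simp [pvRuns]
        split_ifs <;> simp
      · rw [if_neg hb, ih (ind + 1) _ [] (by omega) (by omega) (by omega)]
        rw [hdrop, List.takeWhile_cons_of_pos (by simpa using hb), htn]
        simp [pvRuns, hd]
        refine ⟨?_, by omega⟩
        split_ifs <;> simp

theorem pvSplit_runs (cs : List Char) :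
    ∀ (cint : List Char) (acc : List (List Char)),
    (PySem.Chars.split₀.go (cs.map (fun c => if PySem.Chars.isdigit c then c else ' '))
        cint.reverse acc).map (fun tok => (PySem.Int.ofChars? tok).getD 0) =
      acc.reverse.map (fun tok => (PySem.Int.ofChars? tok).getD 0) ++ pvRuns cs cint := by
  induction cs with
  | nil =>
    intro cint acc
    by_cases h : cint = []
    · subst h; simp [PySem.Chars.split₀.go, pvRuns]
    · simp [PySem.Chars.split₀.go, pvRuns, h]
  | cons c rest ih =>
    intro cint acc
    by_cases hd : PySem.Chars.isdigit c = true
    · have hs : PySem.Chars.isspace c = false := pv_not_space_of_digit c hd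
      simp only [List.map_cons, if_pos hd, PySem.Chars.split₀.go, hs, Bool.false_eq_true,
        if_false]
      have : c :: cint.reverse = (cint ++ [c]).reverse := by simp
      rw [this, ih (cint ++ [c]) acc]
      simp [pvRuns, hd]
    · have hs : PySem.Chars.isspace ' ' = true := by decide
      simp only [List.map_cons, if_neg hd, PySem.Chars.split₀.go, hs, if_true]
      by_cases h : cint = []
      · subst h
        simpa [pvRuns, hd] using ih [] acc
      · rw [if_neg (by simpa [List.isEmpty_iff] using h)]
        rw [List.reverse_reverse]
        have := ih [] (cint :: acc)
        simp only [List.reverse_nil] at this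
        rw [this]
        simp [pvRuns, hd, h]

-- find(']', start) stops exactly where the takeWhile prefix ends
theorem pvFind_takeWhile (L : List Char) (h : ']' ∈ L) :
    PySem.Chars.find L [']'] = ((L.takeWhile (· ≠ ']')).length : Int) := by
  have hinf : [']'] <:+: L := by
    obtain ⟨s, t, rfl⟩ := List.append_of_mem h
    exact ⟨s, t, by simp⟩
  have hpos : 0 ≤ PySem.Chars.find L [']'] := (PySem.Chars.find_nonneg_iff L [']']).mpr hinf
  obtain ⟨hpref, hmin⟩ := PySem.Chars.find_spec hpos
  have hpre : L.takeWhile (· ≠ ']') <+: L := List.takeWhile_prefix _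
  have hlenle : (L.takeWhile (· ≠ ']')).length ≤ L.length := hpre.length_le
  have hlen : (L.takeWhile (· ≠ ']')).length < L.length := by
    rcases lt_or_eq_of_le hlenle with h' | h'
    · exact h'
    · exfalso
      have : L.takeWhile (· ≠ ']') = L := hpre.eq_of_length h'
      have := List.mem_takeWhile_imp (p := (· ≠ ']')) (this ▸ h)
      simp at this
  have hnotP : ∀ i, i < (L.takeWhile (· ≠ ']')).length → L[i]! ≠ ']' := by
    intro i hi
    have hgl : (L.takeWhile (· ≠ ']'))[i] = L[i]'(lt_of_lt_of_le hi hlenle) :=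
      hpre.getElem hi
    have := List.mem_takeWhile_imp (List.getElem_mem hi)
    rw [getElem!_pos L i (lt_of_lt_of_le hi hlenle), ← hgl]
    simpa using this
  have hdw : L.drop (L.takeWhile (· ≠ ']')).length = L.dropWhile (· ≠ ']') := by
    have h2 := List.drop_left (l₁ := List.takeWhile (· ≠ ']') L) (l₂ := List.dropWhile (· ≠ ']') L)
    rwa [List.takeWhile_append_dropWhile] at h2
  have hdwne : L.dropWhile (· ≠ ']') ≠ [] := by
    intro he
    have h2 := List.takeWhile_append_dropWhile (p := (· ≠ ']')) (l := L)
    rw [he, List.append_nil] at h2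
    rw [h2] at hlen
    omega
  obtain ⟨x, xs, hx⟩ := List.exists_cons_of_ne_nil hdwne
  have hhead : (L.dropWhile (· ≠ ']')).head hdwne = ']' := by
    simpa using List.head_dropWhile_not (· ≠ ']') hdwne
  have hx' : x = ']' := by
    have h4 : (L.dropWhile (· ≠ ']')).head hdwne = x := by
      simp only [hx, List.head_cons]
    rw [← h4, hhead]
  have hcons : L.drop (L.takeWhile (· ≠ ']')).length = ']' :: xs := by
    rw [hdw, hx, hx']
  have hbr : L[(L.takeWhile (· ≠ ']')).length]! = ']' := by
    have h2 : L[(L.takeWhile (· ≠ ']')).length]? = some ']' := by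
      have h3 : (L.drop (L.takeWhile (· ≠ ']')).length)[0]? =
          L[(L.takeWhile (· ≠ ']')).length + 0]? := List.getElem?_drop
      rw [hcons] at h3
      simpa using h3.symm
    rw [getElem!_pos L _ hlen]
    rw [List.getElem?_eq_getElem hlen] at h2
    exact Option.some.inj h2
  -- the found index, as a Nat
  have ht1 : (PySem.Chars.find L [']']).toNat ≤ (L.takeWhile (· ≠ ']')).length := by
    by_contra hgt
    push Not at hgt
    exact hmin _ hgt (hcons ▸ ⟨_, rfl⟩)
  have ht2 : (L.takeWhile (· ≠ ']')).length ≤ (PySem.Chars.find L [']']).toNat := by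
    by_contra hgt
    push Not at hgt
    obtain ⟨u, hu⟩ := hpref
    have htlt : (PySem.Chars.find L [']']).toNat < L.length := lt_trans hgt hlen
    have h5 : (L.drop (PySem.Chars.find L [']']).toNat)[0]? =
        L[(PySem.Chars.find L [']']).toNat + 0]? := List.getElem?_drop
    rw [← hu] at h5
    have h6 : L[(PySem.Chars.find L [']']).toNat]! = ']' := by
      rw [getElem!_pos L _ htlt]
      have h7 : L[(PySem.Chars.find L [']']).toNat]? = some ']' := by simpa using h5.symm
      rw [List.getElem?_eq_getElem htlt] at h7
      exact Option.some.inj h7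
    exact hnotP _ hgt h6
  omega

-- ===== VERDICT (by name: the statement is the Claim_ definition above) =====
theorem pvInfix_singleton_mem {L : List Char} (h : [']'] <:+: L) : ']' ∈ L :=
  h.subset (by simp)

theorem eat_list_spec : Claim_equal_eat_list := by
  intro s start _hdom hpre
  have hpre' : 0 ≤ start := hpre
  show eat_list s start = eat_list_alt s start
  unfold eat_list eat_list_alt
  rw [PySem.Str.findFrom_eq]
  have hsub : "]".toList = [']'] := rfl
  rw [hsub]
  by_cases hcase : start ≤ (s.toList.length : Int)
  · -- start within the string
    have ha : ((start.toNat : Nat) : Int) = start := Int.toNat_of_nonneg hpre'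
    have haleN : start.toNat ≤ s.toList.length := by omega
    rw [pvRuns_go s.toList ((((s.toList.length : Nat) : Int) - start).toNat) start [] []
      hpre' hcase rfl]
    rw [← ha, PySem.Chars.findFrom_natCast s.toList [']'] start.toNat haleN]
    dsimp only
    simp only [Int.toNat_natCast]
    by_cases hmem : ']' ∈ s.toList.drop start.toNat
    · rw [pvFind_takeWhile _ hmem]
      have hne : (((((s.toList.drop start.toNat).takeWhile (· ≠ ']')).length : Nat) : Int)) ≠ -1 := by
        omega
      rw [if_neg hne]
      have hne2 : ((start.toNat : Nat) : Int) +
          ((((s.toList.drop start.toNat).takeWhile (· ≠ ']')).length : Nat) : Int) ≠ -1 := by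
        omega
      rw [if_neg hne2]
      have hsl : PySem.List.slice s.toList (some ((start.toNat : Nat) : Int))
          (some (((start.toNat : Nat) : Int) +
            ((((s.toList.drop start.toNat).takeWhile (· ≠ ']')).length : Nat) : Int))) =
          (s.toList.drop start.toNat).takeWhile (· ≠ ']') := by
        rw [PySem.List.slice_natCast_add]
        exact (List.prefix_iff_eq_take.mp (List.takeWhile_prefix _)).symm
      rw [hsl]
      have := pvSplit_runs ((s.toList.drop start.toNat).takeWhile (· ≠ ']')) [] []
      simp only [List.reverse_nil, List.map_nil, List.nil_append] at this
      rw [PySem.Chars.split₀] at *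
      rw [this]
      simp
    · have hfind : PySem.Chars.find (s.toList.drop start.toNat) [']'] = -1 :=
        (PySem.Chars.find_eq_neg_one_iff _ _).mpr (fun hin => hmem (pvInfix_singleton_mem hin))
      rw [hfind, if_pos rfl, if_pos rfl]
      have hP : (s.toList.drop start.toNat).takeWhile (· ≠ ']') = s.toList.drop start.toNat := by
        apply List.takeWhile_eq_self_iff.mpr
        intro x hx
        have hxne : x ≠ ']' := fun he => hmem (he ▸ hx)
        simpa using hxne
      have hsl : PySem.List.slice s.toList (some ((start.toNat : Nat) : Int))
          (some ((s.toList.length : Nat) : Int)) = s.toList.drop start.toNat := by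
        rw [PySem.List.slice_natCast]
        rw [List.take_of_length_le (by simp)]
      rw [hsl, hP]
      have := pvSplit_runs (s.toList.drop start.toNat) [] []
      simp only [List.reverse_nil, List.map_nil, List.nil_append] at this
      rw [PySem.Chars.split₀] at *
      rw [this]
      simp only [Prod.mk.injEq, List.nil_append, List.length_drop]
      exact ⟨trivial, by omega⟩
  · -- start past the end of the string
    rw [eat_list_go, dif_neg (by omega)]
    have hff : PySem.Chars.findFrom s.toList [']'] start none = -1 := by
      simp only [PySem.Chars.findFrom]
      rw [if_neg (show ¬ start < 0 by omega)]
      rw [if_pos (show ((s.toList.length : Nat) : Int) < start by omega)]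
    rw [hff]
    dsimp only
    rw [if_pos rfl]
    have hsl : PySem.List.slice s.toList (some start) (some ((s.toList.length : Nat) : Int)) = [] := by
      rw [PySem.List.slice_toNat s.toList hpre' (by omega)]
      rw [List.drop_eq_nil_of_le (by omega)]
      simp
    rw [hsl]
    simp [PySem.Chars.split₀, PySem.Chars.split₀.go]
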